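-- pv_equiv track=rewrite | github.com/pypi-data/pypi-mirror-375 | packages/filterzyme/filterzyme-0.0.6-py3-none-any.whl/filterzyme/steps/cleanPDB_step.py | remove_duplicate_ligands
-- ===== SOURCE A (Python) =====
-- def remove_duplicate_ligands(pdb_lines):
--     ligand_chain_map = {}
--     result_lines = []
--
--     for line in pdb_lines:
--         if line.startswith("HETATM"):
--             lig = line[17:20].strip()
--             chain = line[21].strip()
--             if lig not in ligand_chain_map:
--                 ligand_chain_map[lig] = chain
--                 result_lines.append(line)
--             elif ligand_chain_map[lig] == chain:
--                 result_lines.append(line)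
--         else:
--             result_lines.append(line)
--
--     return result_lines
-- ===== SOURCE B (Python) =====
-- def remove_duplicate_ligands(pdb_lines):
--     # Pass 1: record, for each ligand code, the chain of its first HETATM line.
--     first_chain = {}
--     for line in pdb_lines:
--         if line.startswith("HETATM"):
--             lig = line[17:20].strip()
--             chain = line[21].strip()
--             if lig not in first_chain:
--                 first_chain[lig] = chain
--     # Pass 2: keep non-HETATM lines; keep HETATM lines only on the first chain.
--     return [line for line in pdb_lines
--             if not line.startswith("HETATM")
--             or first_chain[line[17:20].strip()] == line[21].strip()]
-- ===== Notes on version B (the rewrite author's own statement) =====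
-- stated objective: alternative
-- what changed: B splits A's single fused loop (which builds the ligand->first-chain map and filters simultaneously) into two passes: one loop that only builds the first-chain index, then a comprehension that filters every line against the completed index.
import Mathlib
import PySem

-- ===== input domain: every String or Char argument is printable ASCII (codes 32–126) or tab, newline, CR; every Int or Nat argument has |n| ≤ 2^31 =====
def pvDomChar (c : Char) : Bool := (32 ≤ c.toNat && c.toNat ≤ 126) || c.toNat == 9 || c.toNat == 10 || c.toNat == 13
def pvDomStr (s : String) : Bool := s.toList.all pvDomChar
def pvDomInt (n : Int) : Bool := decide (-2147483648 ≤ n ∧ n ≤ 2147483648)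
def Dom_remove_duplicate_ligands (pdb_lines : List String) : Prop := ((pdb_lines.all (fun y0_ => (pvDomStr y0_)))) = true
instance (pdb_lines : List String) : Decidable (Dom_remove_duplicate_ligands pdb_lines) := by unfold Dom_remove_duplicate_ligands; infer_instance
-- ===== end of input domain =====

-- B replaces A's fused build-and-filter loop by an index-building pass followed by a filtering pass (alternative decomposition, same cost).

-- shared helpers: both Pythons compute these exact expressions on a line
def pvSw (line : String) : Bool := PySem.Str.startswith line "HETATM"
def pvLig (line : String) : List Char := PySem.Chars.strip (PySem.List.slice line.toList (some 17) (some 20))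
-- line[21].strip(): pyGet? none is Python's IndexError, excluded by Pre_ (the .getD [] default is never reached there)
def pvChain (line : String) : List Char := ((PySem.List.pyGet? line.toList 21).map (fun c => PySem.Chars.strip [c])).getD []

-- ===== PORT A =====
def pvStepA (st : PySem.Dict (List Char) (List Char) × List String) (line : String) :
    PySem.Dict (List Char) (List Char) × List String :=
  if pvSw line then
    if st.1.contains (pvLig line) = false then (st.1.insert (pvLig line) (pvChain line), st.2 ++ [line])
    else if st.1.getD (pvLig line) [] = pvChain line then (st.1, st.2 ++ [line])
    else st
  else (st.1, st.2 ++ [line])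

def remove_duplicate_ligands (pdb_lines : List String) : List String :=
  (pdb_lines.foldl pvStepA (PySem.Dict.empty, [])).2

-- ===== PORT B =====
-- pass 1: first-chain index
def pvStepB (d : PySem.Dict (List Char) (List Char)) (line : String) : PySem.Dict (List Char) (List Char) :=
  if pvSw line && !d.contains (pvLig line) then d.insert (pvLig line) (pvChain line) else d

def pvBuild (pdb_lines : List String) : PySem.Dict (List Char) (List Char) :=
  pdb_lines.foldl pvStepB PySem.Dict.empty

-- pass 2 predicate (first_chain[lig] always present for a HETATM line, so getD is the dict lookup)
def pvKeep (m : PySem.Dict (List Char) (List Char)) (line : String) : Bool :=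
  !pvSw line || (m.getD (pvLig line) [] == pvChain line)

def remove_duplicate_ligands_alt (pdb_lines : List String) : List String :=
  pdb_lines.filter (pvKeep (pvBuild pdb_lines))

-- ===== PRECONDITION & SPEC =====
-- Pre_ excludes exactly the inputs where Python A raises IndexError: a HETATM line shorter than 22 characters (line[21]).
def Pre_remove_duplicate_ligands (pdb_lines : List String) : Prop :=
  (pdb_lines.all (fun l => !pvSw l || decide (22 ≤ l.toList.length))) = true
instance (pdb_lines : List String) : Decidable (Pre_remove_duplicate_ligands pdb_lines) := by
  unfold Pre_remove_duplicate_ligands; infer_instance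

def pvWitness_remove_duplicate_ligands : List String :=
  ["HETATM  1  C1  LIG A   1", "ATOM  foo", "HETATM  2  C2  LIG B   1"]

def Spec_remove_duplicate_ligands (pdb_lines : List String) (out : List String) : Prop := out = remove_duplicate_ligands_alt pdb_lines
instance (pdb_lines : List String) (out : List String) : Decidable (Spec_remove_duplicate_ligands pdb_lines out) := by unfold Spec_remove_duplicate_ligands; infer_instance

-- ===== CLAIM (what is proved, stated in full; the proofs are below) =====
def Claim_equal_remove_duplicate_ligands : Prop := ∀ (pdb_lines : List String), Dom_remove_duplicate_ligands pdb_lines → Pre_remove_duplicate_ligands pdb_lines → Spec_remove_duplicate_ligands pdb_lines (remove_duplicate_ligands pdb_lines)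

-- ===== LEMMAS AND PROOFS =====

-- B's first pass never overwrites: an existing binding survives the rest of the pass.
lemma pvBuild_mono (rest : List String) (d : PySem.Dict (List Char) (List Char))
    (k : List Char) (v : List Char) (h : d.get? k = some v) :
    (rest.foldl pvStepB d).get? k = some v := by
  induction rest generalizing d with
  | nil => simpa using h
  | cons line rest ih =>
    simp only [List.foldl_cons]
    apply ih
    unfold pvStepB
    split
    · rename_i hcond
      simp only [Bool.and_eq_true, Bool.not_eq_true'] at hcond
      have hne : k ≠ pvLig line := by
        intro hkl
        rw [PySem.Dict.contains_eq_isSome_get?, ← hkl, h] at hcond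
        simp at hcond
      simp [PySem.Dict.get?_insert, hne, h]
    · exact h

lemma pvMain (rest : List String) (d : PySem.Dict (List Char) (List Char)) (acc : List String) :
    (rest.foldl pvStepA (d, acc)).2 = acc ++ rest.filter (pvKeep (rest.foldl pvStepB d)) := by
  induction rest generalizing d acc with
  | nil => simp
  | cons line rest ih =>
    simp only [List.foldl_cons]
    by_cases hsw : pvSw line = true
    · by_cases hc : d.contains (pvLig line) = true
      · -- lig already indexed: neither step changes the dict
        obtain ⟨v, hv⟩ : ∃ v, d.get? (pvLig line) = some v := by
          rw [PySem.Dict.contains_eq_isSome_get?] at hc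
          exact Option.isSome_iff_exists.mp hc
        have hB : pvStepB d line = d := by
          unfold pvStepB; simp [hc]
        have hgd : (rest.foldl pvStepB d).getD (pvLig line) [] = d.getD (pvLig line) [] := by
          rw [PySem.Dict.getD_of_get?_eq_some _ [] (pvBuild_mono rest d _ v hv),
              PySem.Dict.getD_of_get?_eq_some _ [] hv]
        by_cases heq : d.getD (pvLig line) [] = pvChain line
        · have hA : pvStepA (d, acc) line = (d, acc ++ [line]) := by
            unfold pvStepA; simp [hsw, hc, heq]
          have hk : pvKeep (rest.foldl pvStepB d) line = true := by
            unfold pvKeep; simp [hgd, heq]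
          rw [hA, hB, ih, List.filter_cons_of_pos hk]
          simp
        · have hA : pvStepA (d, acc) line = (d, acc) := by
            unfold pvStepA; simp [hsw, hc, heq]
          have hk : pvKeep (rest.foldl pvStepB d) line = false := by
            unfold pvKeep; simp [hsw, hgd, heq]
          rw [hA, hB, ih, List.filter_cons_of_neg (by simp [hk])]
      · -- first occurrence of lig: both insert, line is kept
        have hc' : d.contains (pvLig line) = false := by simpa using hc
        have hA : pvStepA (d, acc) line = (d.insert (pvLig line) (pvChain line), acc ++ [line]) := by
          unfold pvStepA; simp [hsw, hc']
        have hB : pvStepB d line = d.insert (pvLig line) (pvChain line) := by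
          unfold pvStepB; simp [hsw, hc']
        have hins : (d.insert (pvLig line) (pvChain line)).get? (pvLig line) = some (pvChain line) := by
          simp
        have hk : pvKeep (rest.foldl pvStepB (d.insert (pvLig line) (pvChain line))) line = true := by
          unfold pvKeep
          rw [PySem.Dict.getD_of_get?_eq_some _ [] (pvBuild_mono rest _ _ _ hins)]
          simp
        rw [hA, hB, ih, List.filter_cons_of_pos hk]
        simp
    · have hA : pvStepA (d, acc) line = (d, acc ++ [line]) := by
        unfold pvStepA; simp [hsw]
      have hB : pvStepB d line = d := by
        unfold pvStepB; simp [hsw]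
      have hk : pvKeep (rest.foldl pvStepB d) line = true := by
        unfold pvKeep; simp [hsw]
      rw [hA, hB, ih, List.filter_cons_of_pos hk]
      simp

-- ===== VERDICT (by name: the statement is the Claim_ definition above) =====
theorem remove_duplicate_ligands_spec : Claim_equal_remove_duplicate_ligands := by
  intro pdb_lines _ _
  unfold Spec_remove_duplicate_ligands remove_duplicate_ligands remove_duplicate_ligands_alt pvBuild
  rw [pvMain]
  simp
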